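-- pv_equiv track=rewrite | github.com/FlatBone/Enveil | enveil/main.py | format_cpu_windows
-- ===== SOURCE A (Python) =====
-- def format_cpu_windows(raw_cpu):
--     # PowerShellからのCPU情報を整形
--     try:
--         lines = raw_cpu.splitlines()
--         for line in lines:
--             if "Name" in line and ("Intel" in line or "AMD" in line):
--                 return line.split(':')[-1].strip()
--         # 見つからない場合はモデル名を探す
--         for line in lines:
--             if "Name" in line:
--                 return line.split(':')[-1].strip()
--         return raw_cpu  # それでも見つからなければ元データを返す
--     except Exception:
--         return raw_cpu
-- ===== SOURCE B (Python) =====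
-- def format_cpu_windows(raw_cpu):
--     # Single pass: return first Intel/AMD Name line immediately, remember first Name-only line as fallback.
--     try:
--         fallback = None
--         for line in raw_cpu.splitlines():
--             if "Name" in line and ("Intel" in line or "AMD" in line):
--                 return line.split(':')[-1].strip()
--             if "Name" in line and fallback is None:
--                 fallback = line
--         if fallback is not None:
--             return fallback.split(':')[-1].strip()
--         return raw_cpu
--     except Exception:
--         return raw_cpu
-- ===== Notes on version B (the rewrite author's own statement) =====
-- stated objective: simpler
-- what changed: A's two sequential scans over the split lines (Intel/AMD Name line first, then any Name line) are fused into one pass that returns an Intel/AMD Name line immediately and records the first Name-only line as a fallback used after the loop.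
import Mathlib
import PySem

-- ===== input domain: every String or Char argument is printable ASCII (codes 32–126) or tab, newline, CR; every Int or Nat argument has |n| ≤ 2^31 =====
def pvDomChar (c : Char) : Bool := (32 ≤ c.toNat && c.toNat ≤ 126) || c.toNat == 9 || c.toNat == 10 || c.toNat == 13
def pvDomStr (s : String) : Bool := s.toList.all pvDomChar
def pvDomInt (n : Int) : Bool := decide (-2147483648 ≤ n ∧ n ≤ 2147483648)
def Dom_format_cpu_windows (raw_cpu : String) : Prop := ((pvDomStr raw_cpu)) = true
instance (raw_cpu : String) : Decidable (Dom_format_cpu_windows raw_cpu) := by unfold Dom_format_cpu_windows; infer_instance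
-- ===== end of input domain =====

-- B replaces A's two sequential scans over the lines by one pass that records the first Name-only
-- line as a fallback (objective: simpler). Return value only; neither program mutates anything.

-- line.split(':')[-1].strip()  (split(':') is never empty, so [-1] never raises)
def pvExtract (line : String) : String :=
  PySem.Str.strip (PySem.List.pyGetD ((PySem.Str.split? line ":").getD []) (-1) "")

-- ===== PORT A =====
-- first loop: first line with "Name" and ("Intel" or "AMD")
def pvScan1 : List String → Option String
  | [] => none
  | l :: ls =>
      if PySem.Str.isIn "Name" l && (PySem.Str.isIn "Intel" l || PySem.Str.isIn "AMD" l) then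
        some (pvExtract l)
      else pvScan1 ls

-- second loop: first line with "Name"
def pvScan2 : List String → Option String
  | [] => none
  | l :: ls => if PySem.Str.isIn "Name" l then some (pvExtract l) else pvScan2 ls

def format_cpu_windows (raw_cpu : String) : String :=
  let lines := PySem.Str.splitlines raw_cpu
  match pvScan1 lines with
  | some r => r
  | none =>
    match pvScan2 lines with
    | some r => r
    | none => raw_cpu

-- ===== PORT B =====
-- one pass; .inl = early return value, .inr = final fallback state
def pvScanB : List String → Option String → String ⊕ Option String
  | [], fb => .inr fb
  | l :: ls, fb =>
      if PySem.Str.isIn "Name" l && (PySem.Str.isIn "Intel" l || PySem.Str.isIn "AMD" l) then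
        .inl (pvExtract l)
      else
        pvScanB ls (if PySem.Str.isIn "Name" l && fb.isNone then some l else fb)

def format_cpu_windows_alt (raw_cpu : String) : String :=
  match pvScanB (PySem.Str.splitlines raw_cpu) none with
  | .inl r => r
  | .inr (some f) => pvExtract f
  | .inr none => raw_cpu

-- ===== PRECONDITION & SPEC =====
def Spec_format_cpu_windows (raw_cpu : String) (out : String) : Prop := out = format_cpu_windows_alt raw_cpu
instance (raw_cpu : String) (out : String) : Decidable (Spec_format_cpu_windows raw_cpu out) := by unfold Spec_format_cpu_windows; infer_instance

-- ===== CLAIM (what is proved, stated in full; the proofs are below) =====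
def Claim_equal_format_cpu_windows : Prop := ∀ (raw_cpu : String), Dom_format_cpu_windows raw_cpu → Spec_format_cpu_windows raw_cpu (format_cpu_windows raw_cpu)

-- ===== LEMMAS AND PROOFS =====
-- the one-pass scan with fallback fb equals: first scan, else fb, else second scan
theorem pvScanB_eq (raw : String) : ∀ (lines : List String) (fb : Option String),
    (match pvScanB lines fb with
     | .inl r => r
     | .inr (some f) => pvExtract f
     | .inr none => raw)
    = (match pvScan1 lines with
       | some r => r
       | none =>
         match fb with
         | some f => pvExtract f
         | none =>
           match pvScan2 lines with
           | some r => r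
           | none => raw) := by
  intro lines
  induction lines with
  | nil => intro fb; cases fb <;> rfl
  | cons l ls ih =>
    intro fb
    simp only [pvScanB, pvScan1, pvScan2]
    cases h1 : (PySem.Str.isIn "Name" l && (PySem.Str.isIn "Intel" l || PySem.Str.isIn "AMD" l)) with
    | true => rfl
    | false =>
      simp only [Bool.false_eq_true, if_false]
      cases fb with
      | some f =>
        simpa only [Option.isNone_some, Bool.and_false, Bool.false_eq_true, if_false]
          using ih (some f)
      | none =>
        cases h2 : PySem.Str.isIn "Name" l with
        | true =>
          simp only [Option.isNone_none, Bool.and_true, if_true, ih (some l)]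
        | false =>
          simpa only [Option.isNone_none, Bool.and_true, Bool.false_eq_true, if_false]
            using ih none

-- ===== VERDICT (by name: the statement is the Claim_ definition above) =====
theorem format_cpu_windows_spec : Claim_equal_format_cpu_windows := by
  intro raw _
  unfold Spec_format_cpu_windows format_cpu_windows format_cpu_windows_alt
  rw [pvScanB_eq raw (PySem.Str.splitlines raw) none]
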